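-- pv_equiv track=rewrite | github.com/paradox-analytics/universal-scraper | universal_scraper/core/dom_pattern_detector.py | escape_css_selector
-- ===== SOURCE A (Python) =====
-- def escape_css_selector(selector: str) -> str:
--     """
--     Escape special characters in CSS selectors
--
--     Tailwind CSS uses `:` for arbitrary values (e.g., `h:bg-black-150`)
--     which BeautifulSoup treats as pseudo-classes. We need to escape them.
--
--     Example:
--         'li.h:bg-black-150' -> 'li.h\\:bg-black-150'
--         'div[data-test]' -> 'div[data-test]' (unchanged)
--     """
--     # Split by `.` to process each class separately
--     parts = selector.split('.')
--
--     # Escape `:` in class names (but not in pseudo-classes like :hover)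
--     escaped_parts = []
--     for i, part in enumerate(parts):
--         if i == 0:
--             # First part is the tag name, don't escape
--             escaped_parts.append(part)
--         else:
--             # Class names: escape `:` and `/` (common in Tailwind)
--             # But only if they're in the middle of a class name (not at start)
--             if ':' in part and not part.startswith(':'):
--                 part = part.replace(':', '\\:')
--             if '/' in part:
--                 part = part.replace('/', '\\/')
--             escaped_parts.append(part)
--
--     return '.'.join(escaped_parts)
-- ===== SOURCE B (Python) =====
-- def escape_css_selector(selector: str) -> str:
--     # Single left-to-right scan instead of split/replace/join.
--     out = []
--     in_class = False    # past the first '.'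
--     seg_start = False   # next char begins a new class segment
--     colon_seg = False   # current segment's first char was ':'
--     for c in selector:
--         if c == '.':
--             out.append('.')
--             in_class = True
--             seg_start = True
--         else:
--             if seg_start:
--                 colon_seg = (c == ':')
--                 seg_start = False
--             if in_class and c == '/':
--                 out.append('\\/')
--             elif in_class and c == ':' and not colon_seg:
--                 out.append('\\:')
--             else:
--                 out.append(c)
--     return ''.join(out)
-- ===== Notes on version B (the rewrite author's own statement) =====
-- stated objective: alternative
-- what changed: Replaced A's pipeline of splitting on dots, conditionally str.replace-ing each class segment and rejoining, by a single left-to-right character scan that tracks two flags (past the first dot; segment started with a colon) and emits escaped characters directly.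
import Mathlib
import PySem

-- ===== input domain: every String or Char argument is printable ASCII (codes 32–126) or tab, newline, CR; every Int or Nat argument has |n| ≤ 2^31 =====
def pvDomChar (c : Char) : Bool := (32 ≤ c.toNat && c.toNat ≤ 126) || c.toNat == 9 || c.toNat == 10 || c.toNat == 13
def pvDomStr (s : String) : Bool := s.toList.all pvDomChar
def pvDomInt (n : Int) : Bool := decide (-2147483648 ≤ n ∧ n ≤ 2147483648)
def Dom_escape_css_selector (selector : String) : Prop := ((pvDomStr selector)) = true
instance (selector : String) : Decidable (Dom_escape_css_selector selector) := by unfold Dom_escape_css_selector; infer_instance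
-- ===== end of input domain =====

-- B replaces A's split / conditional replace / join passes by a single left-to-right
-- character scan with two flags (objective: alternative single-pass formulation).

-- ===== PORT A =====
def escape_css_selector (selector : String) : String :=
  -- parts = selector.split('.')
  let parts := PySem.Chars.splitOn selector.toList ['.']
  -- for i, part in enumerate(parts): …
  let escaped_parts := (PySem.List.enumerate parts 0).foldl (fun (acc : List (List Char)) (ip : Int × List Char) =>
    if ip.1 == 0 then acc ++ [ip.2]
    else
      let part1 := if PySem.Chars.isIn [':'] ip.2 && !PySem.Chars.startswith ip.2 [':']
                   then PySem.Chars.replace ip.2 [':'] ['\\', ':'] else ip.2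
      let part2 := if PySem.Chars.isIn ['/'] part1
                   then PySem.Chars.replace part1 ['/'] ['\\', '/'] else part1
      acc ++ [part2]) []
  -- return '.'.join(escaped_parts)
  String.ofList (PySem.Chars.join ['.'] escaped_parts)

-- ===== PORT B =====
-- loop body of B's scan; state = (out, in_class, seg_start, colon_seg)
def stepB (st : List (List Char) × Bool × Bool × Bool) (c : Char) : List (List Char) × Bool × Bool × Bool :=
  if c == '.' then (st.1 ++ [['.']], true, true, st.2.2.2)
  else
    let colon_seg := if st.2.2.1 then c == ':' else st.2.2.2
    if st.2.1 && c == '/' then (st.1 ++ [['\\', '/']], st.2.1, false, colon_seg)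
    else if st.2.1 && c == ':' && !colon_seg then (st.1 ++ [['\\', ':']], st.2.1, false, colon_seg)
    else (st.1 ++ [[c]], st.2.1, false, colon_seg)

def escape_css_selector_alt (selector : String) : String :=
  let st := selector.toList.foldl stepB ([], false, false, false)
  -- return ''.join(out)
  String.ofList (PySem.Chars.join [] st.1)

-- ===== PRECONDITION & SPEC =====
def Spec_escape_css_selector (selector : String) (out : String) : Prop := out = escape_css_selector_alt selector
instance (selector : String) (out : String) : Decidable (Spec_escape_css_selector selector out) := by unfold Spec_escape_css_selector; infer_instance

-- ===== CLAIM (what is proved, stated in full; the proofs are below) =====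
def Claim_equal_escape_css_selector : Prop := ∀ (selector : String), Dom_escape_css_selector selector → Spec_escape_css_selector selector (escape_css_selector selector)

-- ===== LEMMAS AND PROOFS =====

-- split on '.' as a pair (first segment, remaining segments)
def splitDot : List Char → List Char × List (List Char)
  | [] => ([], [])
  | c :: t =>
    let r := splitDot t
    if c = '.' then ([], r.1 :: r.2) else (c :: r.1, r.2)

-- per-character escaping; b = "current segment started with ':'"
def escC (b : Bool) (c : Char) : List Char :=
  if c = '/' then ['\\', '/'] else if c = ':' ∧ b = false then ['\\', ':'] else [c]

def escSeg (b : Bool) (p : List Char) : List Char := p.flatMap (escC b)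

def startsColon (p : List Char) : Bool := p.head? == some ':'

-- the common normal form both programs reach
def tailJoin (ps : List (List Char)) : List Char :=
  ps.flatMap (fun q => '.' :: escSeg (startsColon q) q)

theorem splitOn_go_spec (fuel : Nat) : ∀ (l cur : List Char) (acc : List (List Char)),
    l.length < fuel →
    PySem.Chars.splitOn.go ['.'] fuel l cur acc
      = acc.reverse ++ (cur.reverse ++ (splitDot l).1) :: (splitDot l).2 := by
  induction fuel with
  | zero => intro l cur acc h; omega
  | succ n ih =>
    intro l cur acc h
    cases l with
    | nil =>
      rw [PySem.Chars.splitOn.go]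
      · simp [splitDot]
      · omega
    | cons c t =>
      rw [PySem.Chars.splitOn.go]
      by_cases hc : c = '.'
      · subst hc
        have hp : ['.'].isPrefixOf ('.' :: t) = true := by simp [List.isPrefixOf]
        simp only [hp, if_pos]
        rw [ih _ _ _ (by simpa using Nat.lt_of_succ_lt_succ h)]
        simp [splitDot]
      · have hp : ['.'].isPrefixOf (c :: t) = false := by
          simp [List.isPrefixOf]; exact fun hh => absurd hh.symm hc
        rw [if_neg (by simp [hp])]
        rw [ih _ _ _ (by simpa using Nat.lt_of_succ_lt_succ h)]
        simp [splitDot, hc]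

theorem splitOn_eq (cs : List Char) :
    PySem.Chars.splitOn cs ['.'] = (splitDot cs).1 :: (splitDot cs).2 := by
  rw [PySem.Chars.splitOn]
  rw [splitOn_go_spec _ _ _ _ (by omega)]
  simp

theorem replace_go_spec (o : Char) (new : List Char) (fuel : Nat) :
    ∀ (l acc : List Char), l.length ≤ fuel →
    PySem.Chars.replace.go [o] new fuel l acc
      = acc.reverse ++ l.flatMap (fun c => if c = o then new else [c]) := by
  induction fuel with
  | zero =>
    intro l acc h
    have : l = [] := by cases l <;> simp_all
    subst this; simp [PySem.Chars.replace.go]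
  | succ n ih =>
    intro l acc h
    cases l with
    | nil => simp [PySem.Chars.replace.go]
    | cons c t =>
      rw [PySem.Chars.replace.go]
      by_cases hc : c = o
      · subst hc
        have hp : [c].isPrefixOf (c :: t) = true := by simp [List.isPrefixOf]
        simp only [hp, if_pos]
        rw [ih _ _ (by simpa using Nat.le_of_succ_le_succ h)]
        simp
      · have hp : [o].isPrefixOf (c :: t) = false := by
          simp [List.isPrefixOf]; exact fun hh => absurd hh.symm hc
        simp only [hp]
        rw [if_neg (by simp)]
        rw [ih _ _ (by simpa using Nat.le_of_succ_le_succ h)]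
        simp [hc]

theorem replace_single (cs : List Char) (o : Char) (new : List Char) :
    PySem.Chars.replace cs [o] new = cs.flatMap (fun c => if c = o then new else [c]) := by
  rw [PySem.Chars.replace]
  rw [if_neg (by simp)]
  exact replace_go_spec o new cs.length cs [] (le_refl _)

theorem isIn_single (c : Char) (p : List Char) : PySem.Chars.isIn [c] p = p.contains c := by
  by_cases h : c ∈ p
  · have : PySem.Chars.isIn [c] p = true := by
      rw [PySem.Chars.isIn_iff_infix, List.singleton_infix_iff]; exact h
    simp [this, h]
  · have : PySem.Chars.isIn [c] p = false := by
      rw [PySem.Chars.isIn_eq_false_iff, List.singleton_infix_iff]; exact h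
    simp [this, h]

theorem startswith_single (p : List Char) (c : Char) :
    PySem.Chars.startswith p [c] = (p.head? == some c) := by
  cases p with
  | nil => simp [PySem.Chars.startswith, List.isPrefixOf]
  | cons a t => simp [PySem.Chars.startswith, List.isPrefixOf, eq_comm]

-- A's per-part escaping, named (identical to the loop body of port A for i ≥ 1)
def portEsc (p : List Char) : List Char :=
  let p1 := if PySem.Chars.isIn [':'] p && !PySem.Chars.startswith p [':']
            then PySem.Chars.replace p [':'] ['\\', ':'] else p
  if PySem.Chars.isIn ['/'] p1 then PySem.Chars.replace p1 ['/'] ['\\', '/'] else p1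

theorem flatMap_id_of {l : List Char} {f : Char → List Char} (h : ∀ c ∈ l, f c = [c]) :
    l.flatMap f = l := by
  rw [List.flatMap_congr h]; simp

theorem portEsc_eq (p : List Char) : portEsc p = escSeg (startsColon p) p := by
  unfold portEsc
  simp only [isIn_single, startswith_single]
  by_cases hs : p.head? = some ':'
  · have hsc : startsColon p = true := by simp [startsColon, hs]
    rw [hsc]
    simp only [hs, beq_self_eq_true, Bool.not_true, Bool.and_false, Bool.false_eq_true, if_false]
    by_cases hf : '/' ∈ p
    · rw [if_pos (by simpa using hf), replace_single]
      exact List.flatMap_congr (fun c _ => by by_cases h : c = '/' <;> simp [escC, h])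
    · rw [if_neg (by simpa using hf)]
      exact (flatMap_id_of (fun c hc => by
        have h1 : c ≠ '/' := fun h => hf (h ▸ hc)
        simp [escC, h1])).symm
  · have hsc : startsColon p = false := by
      simp only [startsColon, beq_eq_false_iff_ne, ne_eq]; exact hs
    rw [hsc]
    have hbeq : (p.head? == some ':') = false := by simpa [startsColon] using hsc
    simp only [hbeq, Bool.not_false, Bool.and_true]
    by_cases hcol : ':' ∈ p
    · have hcB : p.contains ':' = true := by simpa using hcol
      rw [if_pos hcB, replace_single]
      by_cases hf : '/' ∈ p
      · have hf1 : '/' ∈ p.flatMap (fun c => if c = ':' then ['\\', ':'] else [c]) := by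
          refine List.mem_flatMap.mpr ⟨'/', hf, ?_⟩
          simp
        have hfB : (p.flatMap (fun c => if c = ':' then ['\\', ':'] else [c])).contains '/' = true := by
          simpa using hf1
        rw [if_pos hfB, replace_single, List.flatMap_assoc]
        exact List.flatMap_congr (fun c _ => by
          by_cases h1 : c = '/' <;> by_cases h2 : c = ':' <;> simp_all [escC])
      · have hf1 : '/' ∉ p.flatMap (fun c => if c = ':' then ['\\', ':'] else [c]) := by
          intro hm
          rcases List.mem_flatMap.mp hm with ⟨c, hc, hm2⟩
          by_cases h2 : c = ':'
          · simp [h2] at hm2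
          · simp [h2] at hm2; exact hf (hm2 ▸ hc)
        have hfB : (p.flatMap (fun c => if c = ':' then ['\\', ':'] else [c])).contains '/' = false := by
          simpa using hf1
        rw [if_neg (show ¬((p.flatMap (fun c => if c = ':' then ['\\', ':'] else [c])).contains '/' = true) by rw [hfB]; simp)]
        exact List.flatMap_congr (fun c hc => by
          have h1 : c ≠ '/' := fun h => hf (h ▸ hc)
          by_cases h2 : c = ':' <;> simp [escC, h2, h1])
    · have hcB : p.contains ':' = false := by simpa using hcol
      rw [show (if p.contains ':' = true then PySem.Chars.replace p [':'] ['\\', ':'] else p) = p from if_neg (by rw [hcB]; simp)]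
      by_cases hf : '/' ∈ p
      · have hfB : p.contains '/' = true := by simpa using hf
        rw [if_pos hfB, replace_single]
        exact List.flatMap_congr (fun c hc => by
          have h2 : c ≠ ':' := fun h => hcol (h ▸ hc)
          by_cases h1 : c = '/' <;> simp [escC, h1, h2])
      · have hfB : p.contains '/' = false := by simpa using hf
        rw [if_neg (show ¬(p.contains '/' = true) by rw [hfB]; simp)]
        exact (flatMap_id_of (fun c hc => by
          have h1 : c ≠ '/' := fun h => hf (h ▸ hc)
          have h2 : c ≠ ':' := fun h => hcol (h ▸ hc)
          simp [escC, h1, h2])).symm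

theorem foldl_enum (ps : List (List Char)) : ∀ (k : Int) (acc : List (List Char)), 1 ≤ k →
    (PySem.List.enumerate ps k).foldl (fun (acc : List (List Char)) (ip : Int × List Char) =>
      if ip.1 == 0 then acc ++ [ip.2]
      else
        let part1 := if PySem.Chars.isIn [':'] ip.2 && !PySem.Chars.startswith ip.2 [':']
                     then PySem.Chars.replace ip.2 [':'] ['\\', ':'] else ip.2
        let part2 := if PySem.Chars.isIn ['/'] part1
                     then PySem.Chars.replace part1 ['/'] ['\\', '/'] else part1
        acc ++ [part2]) acc
      = acc ++ ps.map portEsc := by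
  induction ps with
  | nil => intro k acc _; simp [PySem.List.enumerate]
  | cons q qs ih =>
    intro k acc hk
    rw [PySem.List.enumerate_cons, List.foldl_cons]
    have hne : (k == (0:Int)) = false := by simp; omega
    simp only [hne, Bool.false_eq_true, if_false]
    rw [ih (k+1) _ (by omega)]
    simp [portEsc]

theorem join_dot (p : List Char) (ps : List (List Char)) (f : List Char → List Char) :
    PySem.Chars.join ['.'] (p :: ps.map f) = p ++ ps.flatMap (fun q => '.' :: f q) := by
  induction ps generalizing p with
  | nil => simp [PySem.Chars.join, List.intercalate]
  | cons q qs ih =>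
    simp only [List.map_cons, List.flatMap_cons]
    rw [show PySem.Chars.join ['.'] (p :: f q :: qs.map f)
        = p ++ '.' :: PySem.Chars.join ['.'] (f q :: qs.map f) from ?_]
    · rw [ih (f q)]; simp
    · simp [PySem.Chars.join, List.intercalate, List.intersperse]

theorem foldl_enum0 (p : List Char) (ps : List (List Char)) :
    (PySem.List.enumerate (p :: ps) 0).foldl (fun (acc : List (List Char)) (ip : Int × List Char) =>
      if ip.1 == 0 then acc ++ [ip.2]
      else
        let part1 := if PySem.Chars.isIn [':'] ip.2 && !PySem.Chars.startswith ip.2 [':']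
                     then PySem.Chars.replace ip.2 [':'] ['\\', ':'] else ip.2
        let part2 := if PySem.Chars.isIn ['/'] part1
                     then PySem.Chars.replace part1 ['/'] ['\\', '/'] else part1
        acc ++ [part2]) []
      = p :: ps.map portEsc := by
  rw [PySem.List.enumerate_cons, List.foldl_cons]
  have h0 : (if ((((0 : Int), p)).1 == 0) = true then [] ++ [(((0 : Int), p)).2]
      else
        let part1 := if (PySem.Chars.isIn [':'] (((0 : Int), p)).2 && !PySem.Chars.startswith (((0 : Int), p)).2 [':']) = true
                     then PySem.Chars.replace (((0 : Int), p)).2 [':'] ['\\', ':'] else (((0 : Int), p)).2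
        let part2 := if PySem.Chars.isIn ['/'] part1 = true
                     then PySem.Chars.replace part1 ['/'] ['\\', '/'] else part1
        [] ++ [part2]) = [p] := by simp
  rw [h0, foldl_enum ps (0 + 1) [p] (by omega)]
  simp

theorem A_spec (cs : List Char) :
    (escape_css_selector (String.ofList cs)).toList = (splitDot cs).1 ++ tailJoin (splitDot cs).2 := by
  unfold escape_css_selector
  rw [String.toList_ofList, splitOn_eq, foldl_enum0, join_dot, String.toList_ofList]
  unfold tailJoin
  congr 1
  exact List.flatMap_congr (fun q _ => by rw [portEsc_eq])

-- B side: the characters the scan emits from a given state, as a recursion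
def emit : List Char → Bool → Bool → Bool → List Char
  | [], _, _, _ => []
  | c :: t, ic, ss, b =>
    if c = '.' then '.' :: emit t true true b
    else
      let b' := if ss then c = ':' else b
      (if ic ∧ c = '/' then ['\\', '/']
       else if ic ∧ c = ':' ∧ b' = false then ['\\', ':']
       else [c]) ++ emit t ic false b'

def pieceOf (c : Char) (ic ss b : Bool) : List Char :=
  if c = '.' then ['.']
  else if ic ∧ c = '/' then ['\\', '/']
  else if ic ∧ c = ':' ∧ (if ss then decide (c = ':') else b) = false then ['\\', ':']
  else [c]
def nicOf (c : Char) (ic : Bool) : Bool := if c = '.' then true else ic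
def nssOf (c : Char) : Bool := c = '.'
def nbOf (c : Char) (ss b : Bool) : Bool := if c = '.' then b else (if ss then decide (c = ':') else b)

theorem stepB_eq (out : List (List Char)) (ic ss b : Bool) (c : Char) :
    stepB (out, ic, ss, b) c = (out ++ [pieceOf c ic ss b], nicOf c ic, nssOf c, nbOf c ss b) := by
  by_cases hd : c = '.' <;> by_cases hss : ss <;> by_cases hic : ic <;>
    by_cases h1 : c = '/' <;> by_cases h2 : c = ':' <;> by_cases hb : b <;>
    simp_all [stepB, pieceOf, nicOf, nssOf, nbOf]

theorem emit_cons (c : Char) (t : List Char) (ic ss b : Bool) :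
    emit (c :: t) ic ss b = pieceOf c ic ss b ++ emit t (nicOf c ic) (nssOf c) (nbOf c ss b) := by
  by_cases hd : c = '.' <;> by_cases hss : ss <;> by_cases h2 : c = ':' <;> by_cases hb : b <;>
    simp_all [emit, pieceOf, nicOf, nssOf, nbOf]

theorem foldB_spec (cs : List Char) : ∀ (out : List (List Char)) (ic ss b : Bool),
    ((cs.foldl stepB (out, ic, ss, b)).1).flatten = out.flatten ++ emit cs ic ss b := by
  induction cs with
  | nil => intro out ic ss b; simp [emit]
  | cons c t ih =>
    intro out ic ss b
    rw [List.foldl_cons, stepB_eq, ih, emit_cons]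
    simp

theorem pieceOf_inclass {c : Char} (hc : c ≠ '.') (ss b : Bool) :
    pieceOf c true ss b = escC (if ss then decide (c = ':') else b) c := by
  by_cases hss : ss <;> by_cases h1 : c = '/' <;> by_cases h2 : c = ':' <;> by_cases hb : b <;>
    simp_all [pieceOf, escC]

theorem splitDot_dot (t : List Char) :
    splitDot ('.' :: t) = ([], (splitDot t).1 :: (splitDot t).2) := by simp [splitDot]

theorem splitDot_cons {c : Char} (hc : c ≠ '.') (t : List Char) :
    splitDot (c :: t) = (c :: (splitDot t).1, (splitDot t).2) := by simp [splitDot, hc]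

theorem tailJoin_cons (q : List Char) (qs : List (List Char)) :
    tailJoin (q :: qs) = '.' :: (escSeg (startsColon q) q ++ tailJoin qs) := by simp [tailJoin]

theorem startsColon_cons (c : Char) (p : List Char) :
    startsColon (c :: p) = (c == ':') := by simp [startsColon]

theorem emit_inclass (cs : List Char) :
    (∀ b, emit cs true false b = escSeg b (splitDot cs).1 ++ tailJoin (splitDot cs).2)
    ∧ (∀ b, emit cs true true b
        = escSeg (startsColon (splitDot cs).1) (splitDot cs).1 ++ tailJoin (splitDot cs).2) := by
  induction cs with
  | nil => constructor <;> intro b <;> simp [emit, splitDot, escSeg, tailJoin]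
  | cons c t ih =>
    obtain ⟨ihf, iht⟩ := ih
    by_cases hc : c = '.'
    · subst hc
      refine ⟨fun b => ?_, fun b => ?_⟩ <;>
        simp [emit_cons, pieceOf, nicOf, nssOf, nbOf, iht b, splitDot_dot, tailJoin_cons,
          escSeg, startsColon]
    · refine ⟨fun b => ?_, fun b => ?_⟩
      · simp [emit_cons, pieceOf_inclass hc, nicOf, nssOf, nbOf, ihf b, splitDot_cons hc,
          escSeg, hc]
      · simp [emit_cons, pieceOf_inclass hc, nicOf, nssOf, nbOf, ihf (decide (c = ':')),
          splitDot_cons hc, escSeg, startsColon_cons, hc, beq_eq_decide]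

theorem emit_tag (cs : List Char) :
    emit cs false false false = (splitDot cs).1 ++ tailJoin (splitDot cs).2 := by
  induction cs with
  | nil => simp [emit, splitDot, tailJoin]
  | cons c t ih =>
    by_cases hc : c = '.'
    · subst hc
      simp [emit_cons, pieceOf, nicOf, nssOf, nbOf, (emit_inclass t).2 false, splitDot_dot,
        tailJoin_cons]
    · simp [emit_cons, pieceOf, nicOf, nssOf, nbOf, ih, splitDot_cons hc, hc]

theorem join_nil_flatten (l : List (List Char)) :
    PySem.Chars.join [] l = l.flatten := by
  simp [PySem.Chars.join, List.intercalate]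
  induction l with
  | nil => simp
  | cons x t ih => cases t <;> simp_all [List.intersperse]

theorem B_spec (cs : List Char) :
    (escape_css_selector_alt (String.ofList cs)).toList = (splitDot cs).1 ++ tailJoin (splitDot cs).2 := by
  unfold escape_css_selector_alt
  rw [String.toList_ofList, String.toList_ofList, join_nil_flatten, foldB_spec]
  simpa using emit_tag cs

-- ===== VERDICT (by name: the statement is the Claim_ definition above) =====
theorem escape_css_selector_spec : Claim_equal_escape_css_selector := by
  intro selector _
  unfold Spec_escape_css_selector
  have hA := A_spec selector.toList
  have hB := B_spec selector.toList
  rw [String.ofList_toList] at hA hB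
  have := hA.trans hB.symm
  exact String.toList_inj.mp this
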